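-- pv_equiv track=rewrite | github.com/gihsism/ifrs18tool | modules/statement_detector.py | _count_signals
-- ===== SOURCE A (Python) =====
-- def _count_signals(accounts: list[str], signal_list: list[str]) -> int:
--     """Count how many items match signals from the list."""
--     count = 0
--     for acct in accounts:
--         acct_lower = acct.lower()
--         for signal in signal_list:
--             if signal in acct_lower:
--                 count += 1
--                 break  # count each account only once per statement type
--     return count
-- ===== SOURCE B (Python) =====
-- def _count_signals(accounts: list[str], signal_list: list[str]) -> int:
--     """Count how many items match signals from the list.
--
--     Signals-outer sweep: each sig scans only the accounts not yet matched,
--     matched accounts are removed from the pool, so each account is counted once.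
--     """
--     count = 0
--     remaining = [acct.lower() for acct in accounts]
--     for sig in signal_list:
--         still = []
--         for acct_lower in remaining:
--             if sig in acct_lower:
--                 count += 1
--             else:
--                 still.append(acct_lower)
--         remaining = still
--     return count
-- ===== Notes on version B (the rewrite author's own statement) =====
-- stated objective: alternative
-- what changed: A loops accounts-outer with an inner break on the first matching signal; B sweeps signals-outer over a shrinking pool of still-unmatched lowered accounts, removing each account when a signal hits it.
import Mathlib
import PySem

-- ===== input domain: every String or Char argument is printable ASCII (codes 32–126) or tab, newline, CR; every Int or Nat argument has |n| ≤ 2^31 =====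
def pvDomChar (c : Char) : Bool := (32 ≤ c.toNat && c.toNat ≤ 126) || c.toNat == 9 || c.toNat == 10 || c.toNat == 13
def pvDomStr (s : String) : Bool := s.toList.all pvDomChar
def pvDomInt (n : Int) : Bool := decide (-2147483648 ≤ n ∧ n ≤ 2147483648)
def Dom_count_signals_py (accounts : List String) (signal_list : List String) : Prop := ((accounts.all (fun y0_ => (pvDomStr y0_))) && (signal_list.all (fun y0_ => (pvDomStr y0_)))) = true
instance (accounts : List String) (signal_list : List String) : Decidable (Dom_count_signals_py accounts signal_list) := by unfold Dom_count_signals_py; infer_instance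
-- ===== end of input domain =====

-- B replaces A's accounts-outer loop (inner scan over all signals with a break) by a
-- signals-outer sweep that removes matched accounts from the pool; same cost class, alternative structure.

-- ===== PORT A =====
-- inner 'for signal in signal_list: if signal in acct_lower: count += 1; break'
def pvAInner (acct_lower : String) (sigs : List String) (count : Int) : Int :=
  match sigs with
  | [] => count
  | s :: rest =>
    if PySem.Str.isIn s acct_lower then count + 1
    else pvAInner acct_lower rest count

def count_signals_py (accounts : List String) (signal_list : List String) : Int :=
  accounts.foldl (fun count acct => pvAInner (PySem.Str.lower acct) signal_list count) 0

-- ===== PORT B =====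
-- one signal's pass over the remaining pool: bump count on a match, keep the rest
def pvBPass (signal : String) (st : Int × List String) : Int × List String :=
  st.2.foldl
    (fun (q : Int × List String) a =>
      if PySem.Str.isIn signal a then (q.1 + 1, q.2) else (q.1, q.2 ++ [a]))
    (st.1, [])

def count_signals_py_alt (accounts : List String) (signal_list : List String) : Int :=
  (signal_list.foldl (fun st signal => pvBPass signal st)
    (0, accounts.map (fun acct => PySem.Str.lower acct))).1

-- ===== PRECONDITION & SPEC =====
def Spec_count_signals_py (accounts : List String) (signal_list : List String) (out : Int) : Prop := out = count_signals_py_alt accounts signal_list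
instance (accounts : List String) (signal_list : List String) (out : Int) : Decidable (Spec_count_signals_py accounts signal_list out) := by unfold Spec_count_signals_py; infer_instance

-- ===== CLAIM (what is proved, stated in full; the proofs are below) =====
def Claim_equal_count_signals_py : Prop := ∀ (accounts : List String) (signal_list : List String), Dom_count_signals_py accounts signal_list → Spec_count_signals_py accounts signal_list (count_signals_py accounts signal_list)

-- ===== LEMMAS AND PROOFS =====

-- the account predicate both programs decide: some signal occurs in the (lowered) account
def pvHit (sigs : List String) (a : String) : Bool := sigs.any (fun s => PySem.Str.isIn s a)

lemma pvAInner_eq (a : String) (sigs : List String) (c : Int) :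
    pvAInner a sigs c = c + (if pvHit sigs a then 1 else 0) := by
  induction sigs with
  | nil => simp [pvAInner, pvHit]
  | cons s rest ih =>
    unfold pvAInner
    by_cases hc : PySem.Chars.isIn s.toList a.toList
    · rw [if_pos (by simp [hc]), if_pos (by simp [pvHit, hc])]
    · rw [if_neg (by simp [hc]), ih]
      have : pvHit (s :: rest) a = pvHit rest a := by simp [pvHit, hc]
      rw [this]

lemma countA_gen (t sigs : List String) (c : Int) :
    t.foldl (fun count acct => pvAInner (PySem.Str.lower acct) sigs count) c
      = c + ((t.map (fun acct => PySem.Str.lower acct)).countP (pvHit sigs) : Int) := by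
  induction t generalizing c with
  | nil => simp
  | cons b tb ih =>
    rw [List.foldl_cons, ih, pvAInner_eq, List.map_cons, List.countP_cons]
    by_cases h : pvHit sigs (PySem.Str.lower b)
    · rw [if_pos h, if_pos h]; push_cast; omega
    · rw [if_neg h, if_neg (by exact h)]; push_cast; omega

lemma pvBPass_eq (s : String) (rem : List String) (c : Int) (acc : List String) :
    rem.foldl
      (fun (q : Int × List String) a =>
        if PySem.Str.isIn s a then (q.1 + 1, q.2) else (q.1, q.2 ++ [a])) (c, acc)
    = (c + rem.countP (fun a => PySem.Str.isIn s a),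
       acc ++ rem.filter (fun a => !PySem.Str.isIn s a)) := by
  induction rem generalizing c acc with
  | nil => simp
  | cons a t ih =>
    rw [List.foldl_cons]
    by_cases hc : PySem.Chars.isIn s.toList a.toList
    · rw [if_pos (by simp [hc]), ih, List.countP_cons,
          List.filter_cons_of_neg (by simp [hc])]
      refine Prod.ext ?_ rfl
      have : (if PySem.Str.isIn s a = true then 1 else 0) = 1 := by simp [hc]
      simp only [this]; push_cast; omega
    · rw [if_neg (by simp [hc]), ih, List.countP_cons,
          List.filter_cons_of_pos (by simp [hc])]
      refine Prod.ext ?_ ?_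
      · have : (if PySem.Str.isIn s a = true then 1 else 0) = 0 := by simp [hc]
        simp only [this]; push_cast; omega
      · simp

-- splitting the hit count of (s :: sigs) between s's pass and the surviving pool
lemma pvCount_split (s : String) (sigs rem : List String) :
    rem.countP (pvHit (s :: sigs))
      = rem.countP (fun a => PySem.Str.isIn s a)
        + (rem.filter (fun a => !PySem.Str.isIn s a)).countP (pvHit sigs) := by
  induction rem with
  | nil => simp
  | cons a t ih =>
    rw [List.countP_cons, List.countP_cons]
    by_cases hc : PySem.Chars.isIn s.toList a.toList
    · rw [List.filter_cons_of_neg (by simp [hc]),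
          if_pos (show pvHit (s :: sigs) a = true by simp [pvHit, hc]),
          if_pos (show PySem.Str.isIn s a = true by simp [hc]), ih]
      omega
    · rw [List.filter_cons_of_pos (by simp [hc]), List.countP_cons,
          show pvHit (s :: sigs) a = pvHit sigs a by simp [pvHit, hc],
          if_neg (show ¬ PySem.Str.isIn s a = true by simp [hc]), ih]
      omega

lemma countB_eq (sigs : List String) (c : Int) (rem : List String) :
    (sigs.foldl (fun st signal => pvBPass signal st) (c, rem)).1
      = c + (rem.countP (pvHit sigs) : Int) := by
  induction sigs generalizing c rem with
  | nil => simp [pvHit]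
  | cons s rest ih =>
    rw [List.foldl_cons,
        show pvBPass s (c, rem)
          = (c + rem.countP (fun a => PySem.Str.isIn s a),
             rem.filter (fun a => !PySem.Str.isIn s a)) from by
          rw [pvBPass, pvBPass_eq, List.nil_append],
        ih, pvCount_split]
    push_cast; omega

-- ===== VERDICT (by name: the statement is the Claim_ definition above) =====
theorem count_signals_py_spec : Claim_equal_count_signals_py := by
  intro accounts sigs _
  unfold Spec_count_signals_py count_signals_py_alt count_signals_py
  rw [countA_gen, countB_eq]
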